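-- pv_equiv track=rewrite | github.com/rf-iasys/OEIS | OEIS_A045943.py | A045943
-- ===== SOURCE A (Python) =====
-- def A045943(n):
--     marked = []
--     current = 1
--     k = 0
--
--     while len(marked) < n:
--         k += current - 1
--         current += 3
--         marked.append(k)
--
--     return marked
-- ===== SOURCE B (Python) =====
-- def A045943(n):
--     return [3 * i * (i + 1) // 2 for i in range(n)]
-- ===== Notes on version B (the rewrite author's own statement) =====
-- stated objective: simpler
-- what changed: B computes each term directly from the closed form 3*i*(i+1)//2 over range(n) instead of A's while-loop that threads a running step `current` and accumulator `k`.
import Mathlib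
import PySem

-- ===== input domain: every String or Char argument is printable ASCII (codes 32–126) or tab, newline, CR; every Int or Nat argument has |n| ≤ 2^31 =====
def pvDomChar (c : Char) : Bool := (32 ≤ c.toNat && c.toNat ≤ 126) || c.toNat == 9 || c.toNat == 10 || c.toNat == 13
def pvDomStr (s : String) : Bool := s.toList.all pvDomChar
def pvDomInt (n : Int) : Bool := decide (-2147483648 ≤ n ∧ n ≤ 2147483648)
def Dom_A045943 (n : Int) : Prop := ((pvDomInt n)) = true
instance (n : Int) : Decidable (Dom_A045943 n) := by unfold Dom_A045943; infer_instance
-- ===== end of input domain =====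

-- B replaces A's while-loop (running `current` step and accumulator `k`) by the closed form 3*i*(i+1)//2 per index; objective: simpler.

-- ===== PORT A =====
-- the while-loop runs exactly max(n,0) times (marked grows by one each pass), so fuel = n.toNat
def A045943_loop : Nat → List Int → Int → Int → List Int
  | 0, marked, _, _ => marked
  | fuel+1, marked, current, k =>
      let k' := k + (current - 1)
      A045943_loop fuel (marked ++ [k']) (current + 3) k'

def A045943 (n : Int) : List Int := A045943_loop n.toNat [] 1 0

-- ===== PORT B =====
def A045943_alt (n : Int) : List Int :=
  (PySem.List.pyRange 0 n 1).map (fun i => PySem.Int.floordiv (3 * i * (i + 1)) 2)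

-- ===== PRECONDITION & SPEC =====
def Spec_A045943 (n : Int) (out : List Int) : Prop := out = A045943_alt n
instance (n : Int) (out : List Int) : Decidable (Spec_A045943 n out) := by unfold Spec_A045943; infer_instance

-- ===== CLAIM (what is proved, stated in full; the proofs are below) =====
def Claim_equal_A045943 : Prop := ∀ (n : Int), Dom_A045943 n → Spec_A045943 n (A045943 n)

-- ===== LEMMAS AND PROOFS =====

lemma A045943_term_step (u : Int) : 3 * u * (u - 1) / 2 + (1 + 3 * u - 1) = 3 * u * (u + 1) / 2 := by
  have h : 3 * u * (u + 1) = 3 * u * (u - 1) + 3 * u * 2 := by ring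
  rw [h, Int.add_mul_ediv_right _ _ (by norm_num : (2:Int) ≠ 0)]
  ring

lemma A045943_loop_eq (m : Nat) : ∀ (t : Nat) (marked : List Int),
    A045943_loop m marked (1 + 3 * (t : Int)) (3 * (t : Int) * ((t : Int) - 1) / 2)
      = marked ++ (List.range m).map (fun j => 3 * ((t + j : Nat) : Int) * (((t + j : Nat) : Int) + 1) / 2) := by
  induction m with
  | zero => intro t marked; simp [A045943_loop]
  | succ m ih =>
    intro t marked
    rw [A045943_loop]
    have hk : (3 * (t : Int) * ((t : Int) - 1) / 2 + (1 + 3 * (t : Int) - 1))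
        = 3 * (t : Int) * ((t : Int) + 1) / 2 := A045943_term_step (t : Int)
    have hc : (1 + 3 * (t : Int) + 3) = 1 + 3 * ((t + 1 : Nat) : Int) := by push_cast; ring
    have hk' : 3 * (t : Int) * ((t : Int) + 1) / 2
        = 3 * ((t + 1 : Nat) : Int) * (((t + 1 : Nat) : Int) - 1) / 2 := by push_cast; ring_nf
    simp only [hk, hc, hk']
    rw [ih (t + 1)]
    rw [List.range_succ_eq_map, List.map_cons, List.map_map, List.append_assoc,
      List.singleton_append]
    congr 1
    congr 1
    · push_cast; ring_nf
    · apply List.map_congr_left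
      intro j _
      simp only [Function.comp]
      congr 2 <;> push_cast <;> ring

lemma A045943_eq_alt (n : Int) : A045943 n = A045943_alt n := by
  unfold A045943 A045943_alt
  have h0 : A045943_loop n.toNat [] 1 0
      = A045943_loop n.toNat [] (1 + 3 * ((0 : Nat) : Int)) (3 * ((0 : Nat) : Int) * (((0 : Nat) : Int) - 1) / 2) := by
    norm_num
  rw [h0, A045943_loop_eq n.toNat 0]
  rw [PySem.List.pyRange_one]
  simp only [List.nil_append, List.map_map, Int.sub_zero]
  apply List.map_congr_left
  intro j hj
  simp only [Function.comp, Nat.zero_add]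
  rw [PySem.Int.floordiv_eq_ediv_of_pos (by norm_num)]
  ring_nf

-- ===== VERDICT (by name: the statement is the Claim_ definition above) =====
theorem A045943_spec : Claim_equal_A045943 := by
  intro n _
  unfold Spec_A045943
  exact A045943_eq_alt n
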